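-- pv_equiv track=rewrite | github.com/Razrquine/bookbot | main.py | sort_dictionary_by_value
-- ===== SOURCE A (Python) =====
-- def sort_dictionary_by_value(dictionary):
--     # https://www.freecodecamp.org/news/sort-dictionary-by-value-in-python/
--     # This somehow sorts a dictionary by values in just one line but I don't really understand it
--     # return dict(sorted(dictionary.items(), key=lambda x: x[1], reverse=True))
--     listed_dictionary = []
--     sorted_dictionary = {}
--
--     for item in dictionary:
--         listed_dictionary.append({"char": item, "num": dictionary[item]})
--
--     listed_dictionary.sort(key=sort_on, reverse=True)
--
--     for item in listed_dictionary:
--         sorted_dictionary[item["char"]] = item["num"]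
--
--     return sorted_dictionary
--
-- def sort_on(d):
--     return d["num"]
-- ===== SOURCE B (Python) =====
-- def sort_dictionary_by_value(dictionary):
--     # Group keys into buckets by value (in iteration order), then emit the
--     # buckets by descending value: only the distinct values get sorted.
--     buckets = {}
--     for key in dictionary:
--         buckets.setdefault(dictionary[key], []).append(key)
--     result = {}
--     for value in sorted(buckets, reverse=True):
--         for key in buckets[value]:
--             result[key] = value
--     return result
-- ===== Notes on version B (the rewrite author's own statement) =====
-- stated objective: faster
-- what changed: Instead of materialising a list of one-entry dicts and stable-sorting all n items by value, B buckets keys by value in one pass and concatenates the buckets over the distinct values sorted descending (stability comes from bucket append order); it sorts only the distinct values and skips the per-item dict wrapping.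
import Mathlib
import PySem

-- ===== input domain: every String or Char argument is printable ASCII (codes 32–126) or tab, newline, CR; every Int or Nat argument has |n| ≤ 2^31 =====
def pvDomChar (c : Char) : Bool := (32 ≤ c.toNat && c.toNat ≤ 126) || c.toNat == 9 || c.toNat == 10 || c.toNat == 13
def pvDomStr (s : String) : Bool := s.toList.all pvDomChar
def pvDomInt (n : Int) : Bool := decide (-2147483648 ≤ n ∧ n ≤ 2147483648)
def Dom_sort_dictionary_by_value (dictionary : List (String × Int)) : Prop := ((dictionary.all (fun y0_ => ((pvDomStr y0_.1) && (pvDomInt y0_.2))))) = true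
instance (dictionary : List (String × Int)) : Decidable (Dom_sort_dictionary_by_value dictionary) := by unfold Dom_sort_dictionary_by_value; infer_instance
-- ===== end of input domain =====

-- B groups keys into value-buckets in one pass and concatenates the buckets over the
-- distinct values sorted descending, instead of stable-sorting all items (objective: faster,
-- measured).


-- ===== PORT A =====
def sort_dictionary_by_value (dictionary : List (String × Int)) : List (String × Int) :=
  -- `for item in dictionary:` iterates the dict's keys; `dictionary[item]` is the lookup
  -- (the key is always present, so the `getD` default 0 is never used).
  let d := PySem.Dict.mk dictionary
  let listed := dictionary.foldl (fun acc item => acc ++ [(item.1, d.getD item.1 0)]) []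
  let sortedL := PySem.List.sorted listed (fun p => p.2) true
  let sd := sortedL.foldl (fun r p => r.insert p.1 p.2) (PySem.Dict.empty : PySem.Dict String Int)
  sd.items

-- ===== PORT B =====
def sort_dictionary_by_value_alt (dictionary : List (String × Int)) : List (String × Int) :=
  -- buckets.setdefault(dictionary[key], []).append(key)  =  modify at the value with default []
  let buckets := dictionary.foldl (fun b p => b.modify p.2 [] (fun ks => ks ++ [p.1]))
      (PySem.Dict.empty : PySem.Dict Int (List String))
  let result := (PySem.List.sorted buckets.keys (fun v => v) true).foldl
      (fun r v => (buckets.getD v []).foldl (fun r k => r.insert k v) r)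
      (PySem.Dict.empty : PySem.Dict String Int)
  result.items

-- ===== PRECONDITION & SPEC =====
-- Pre_ excludes association lists with a repeated key: A's Python argument is a dict, which
-- cannot contain a duplicate key (such a list has no dict counterpart).
def Pre_sort_dictionary_by_value (dictionary : List (String × Int)) : Prop :=
  (dictionary.map (fun p => p.1)).Nodup
instance (dictionary : List (String × Int)) : Decidable (Pre_sort_dictionary_by_value dictionary) := by unfold Pre_sort_dictionary_by_value; infer_instance
def pvWitness_sort_dictionary_by_value : (List (String × Int)) := [("a", 1), ("b", 2), ("c", 1)]

def Spec_sort_dictionary_by_value (dictionary : List (String × Int)) (out : List (String × Int)) : Prop := out = sort_dictionary_by_value_alt dictionary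
instance (dictionary : List (String × Int)) (out : List (String × Int)) : Decidable (Spec_sort_dictionary_by_value dictionary out) := by unfold Spec_sort_dictionary_by_value; infer_instance

-- ===== CLAIM (what is proved, stated in full; the proofs are below) =====
def Claim_equal_sort_dictionary_by_value : Prop := ∀ (dictionary : List (String × Int)), Dom_sort_dictionary_by_value dictionary → Pre_sort_dictionary_by_value dictionary → Spec_sort_dictionary_by_value dictionary (sort_dictionary_by_value dictionary)

-- ===== LEMMAS AND PROOFS =====

-- insert a fresh value into a strictly decreasing list of values
def insVal (v : Int) : List Int → List Int
  | [] => [v]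
  | w :: ws => if w < v then v :: w :: ws else w :: insVal v ws

theorem mem_insVal (v y : Int) (V : List Int) : y ∈ insVal v V ↔ y = v ∨ y ∈ V := by
  induction V with
  | nil => simp [insVal]
  | cons w ws ih =>
    simp only [insVal]
    split_ifs
    · simp [List.mem_cons]
    · simp [List.mem_cons, ih]
      tauto

theorem perm_insVal (v : Int) (V : List Int) : (insVal v V).Perm (v :: V) := by
  induction V with
  | nil => simp [insVal]
  | cons w ws ih =>
    simp only [insVal]
    split_ifs
    · exact List.Perm.refl _
    · exact (ih.cons w).trans (List.Perm.swap v w ws)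

theorem pairwise_insVal (v : Int) (V : List Int)
    (hV : V.Pairwise (fun a b => b < a)) (hne : ∀ w ∈ V, w ≠ v) :
    (insVal v V).Pairwise (fun a b => b < a) := by
  induction V with
  | nil => simp [insVal]
  | cons w ws ih =>
    rcases List.pairwise_cons.mp hV with ⟨hall, htail⟩
    simp only [insVal]
    split_ifs with hlt
    · exact List.pairwise_cons.mpr ⟨by
        intro y hy
        rcases List.mem_cons.mp hy with rfl | hy
        · exact hlt
        · exact lt_trans (hall y hy) hlt, hV⟩
    · refine List.pairwise_cons.mpr ⟨?_, ?_⟩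
      · intro y hy
        rcases (mem_insVal v y ws).mp hy with rfl | hy
        · exact lt_of_le_of_ne (not_lt.mp hlt) (Ne.symm (hne w (by simp)))
        · exact hall y hy
      · exact ih htail (fun w hw => hne w (by simp [hw]))

theorem insertBy_append_left {α : Type} (before : α → α → Bool) (x : α) (ys zs : List α)
    (h : ∀ y ∈ ys, before x y = false) :
    PySem.List.insertBy before x (ys ++ zs) = ys ++ PySem.List.insertBy before x zs := by
  induction ys with
  | nil => simp
  | cons y ys ih =>
    simp only [List.cons_append, PySem.List.insertBy, h y (by simp)]
    simp only [Bool.false_eq_true, if_false]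
    exact congrArg (y :: ·) (ih (fun y hy => h y (by simp [hy])))

theorem insertBy_all_before {α : Type} (before : α → α → Bool) (x : α) (zs : List α)
    (h : ∀ y ∈ zs, before x y = true) :
    PySem.List.insertBy before x zs = x :: zs := by
  cases zs with
  | nil => rfl
  | cons z zs => simp [PySem.List.insertBy, h z (by simp)]

theorem insert_flatMap_mem {α : Type} (key : α → Int) (x : α) (V : List Int) (g : Int → List α)
    (hV : V.Pairwise (fun a b => b < a))
    (hg : ∀ v ∈ V, ∀ y ∈ g v, key y = v)
    (hmem : key x ∈ V) :
    PySem.List.insertBy (fun a b => decide (key b < key a)) x (V.flatMap g)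
      = V.flatMap (fun w => if w = key x then g w ++ [x] else g w) := by
  induction V with
  | nil => simp at hmem
  | cons w ws ih =>
    rcases List.pairwise_cons.mp hV with ⟨hall, htail⟩
    rw [List.flatMap_cons, List.flatMap_cons]
    by_cases hw : w = key x
    · -- insert at the end of g w
      rw [insertBy_append_left _ _ _ _ (by
        intro y hy
        have := hg w (by simp) y hy
        simp [this, hw])]
      rw [insertBy_all_before _ _ _ (by
        intro y hy
        rcases List.mem_flatMap.mp hy with ⟨v, hv, hyv⟩
        have hkey := hg v (by simp [hv]) y hyv
        have : v < w := hall v hv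
        simp [hkey]; omega)]
      have hcong : List.flatMap (fun v => if v = key x then g v ++ [x] else g v) ws
          = List.flatMap g ws := List.flatMap_congr (fun v hv =>
        if_neg (by intro h; subst h; exact absurd (hall _ hv) (by simp [hw])))
      rw [if_pos hw, hcong]
      simp
    · have hmem' : key x ∈ ws := (List.mem_cons.mp hmem).resolve_left (fun h => hw h.symm)
      have hlt : key x < w := hall _ hmem'
      rw [insertBy_append_left _ _ _ _ (by
        intro y hy
        have := hg w (by simp) y hy
        simp [this]; omega)]
      rw [ih htail (fun v hv y hy => hg v (by simp [hv]) y hy) hmem', if_neg hw]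
theorem insert_flatMap_fresh {α : Type} (key : α → Int) (x : α) (V : List Int) (g : Int → List α)
    (hV : V.Pairwise (fun a b => b < a))
    (hg : ∀ v ∈ V, ∀ y ∈ g v, key y = v)
    (hmem : key x ∉ V) (hx : g (key x) = []) :
    PySem.List.insertBy (fun a b => decide (key b < key a)) x (V.flatMap g)
      = (insVal (key x) V).flatMap (fun w => if w = key x then g w ++ [x] else g w) := by
  induction V with
  | nil => simp [insVal, PySem.List.insertBy, hx]
  | cons w ws ih =>
    rcases List.pairwise_cons.mp hV with ⟨hall, htail⟩
    have hwne : w ≠ key x := fun h => hmem (by simp [h])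
    rw [List.flatMap_cons]
    simp only [insVal]
    by_cases hlt : w < key x
    · rw [if_pos hlt, insertBy_all_before _ _ _ (by
        intro y hy
        rcases List.mem_append.mp hy with hy | hy
        · have := hg w (by simp) y hy
          simp [this]; omega
        · rcases List.mem_flatMap.mp hy with ⟨v, hv, hyv⟩
          have hkey := hg v (by simp [hv]) y hyv
          have : v < w := hall v hv
          simp [hkey]; omega)]
      rw [List.flatMap_cons, if_pos rfl, hx, List.nil_append]
      rw [List.flatMap_cons]
      have hcong : List.flatMap (fun v => if v = key x then g v ++ [x] else g v) ws
          = List.flatMap g ws := List.flatMap_congr (fun v hv =>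
        if_neg (by intro h; subst h; exact absurd (hall _ hv) (by omega)))
      rw [hcong, if_neg hwne]
      rfl
    · rw [if_neg hlt]
      rw [insertBy_append_left _ _ _ _ (by
        intro y hy
        have := hg w (by simp) y hy
        simp [this]; omega)]
      rw [ih htail (fun v hv y hy => hg v (by simp [hv]) y hy) (fun h => hmem (by simp [h]))]
      rw [List.flatMap_cons, if_neg hwne]
-- the distinct values of xs (first occurrences), sorted in descending order
def distinctVals {α : Type} (key : α → Int) (xs : List α) : List Int :=
  PySem.List.sorted (PySem.Set.ofList (xs.map key)) (fun v => v) true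

theorem ofList_append_singleton (ys : List Int) (c : Int) :
    PySem.Set.ofList (ys ++ [c]) =
      if c ∈ PySem.Set.ofList ys then PySem.Set.ofList ys else PySem.Set.ofList ys ++ [c] := by
  simp only [PySem.Set.ofList, List.foldl_append, List.foldl_cons, List.foldl_nil, PySem.Set.add]
  split_ifs with h1 h2 h2 <;> try rfl
  · exact absurd (List.contains_iff_mem.mp h1) h2
  · exact absurd (List.contains_iff_mem.mpr h2) (by simp_all)

theorem pairwise_distinctVals {α : Type} (key : α → Int) (xs : List α) :
    (distinctVals key xs).Pairwise (fun a b => b < a) := by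
  have h1 := PySem.List.sorted_pairwise_rev (PySem.Set.ofList (xs.map key)) (fun v => v)
  have h2 : (distinctVals key xs).Nodup :=
    (PySem.List.sorted_perm (PySem.Set.ofList (xs.map key)) (fun v => v) true).symm.nodup
      (PySem.Set.nodup_ofList _)
  exact (h1.and h2).imp (fun h => lt_of_le_of_ne h.1 (Ne.symm h.2))
-- STABILITY: the stable descending sort by key is the concatenation of the key-groups
-- (in original order) over the distinct keys in descending order.
theorem sorted_rev_eq_flatMap_groups {α : Type} (key : α → Int) (xs : List α) :
    PySem.List.sorted xs key true
      = (distinctVals key xs).flatMap (fun v => xs.filter (fun y => key y == v)) := by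
  induction xs using List.reverseRecOn with
  | nil => rfl
  | append_singleton xs x ih =>
    rw [PySem.List.sorted_rev_eq_foldl_insertBy, List.foldl_append, List.foldl_cons,
      List.foldl_nil, ← PySem.List.sorted_rev_eq_foldl_insertBy, ih]
    have hg : ∀ v ∈ distinctVals key xs, ∀ y ∈ xs.filter (fun y => key y == v), key y = v := by
      intro v _ y hy
      exact beq_iff_eq.mp (List.mem_filter.mp hy).2
    have hgrpeq : ∀ V : List Int,
        V.flatMap (fun w => if w = key x then xs.filter (fun y => key y == w) ++ [x]
            else xs.filter (fun y => key y == w))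
        = V.flatMap (fun v => (xs ++ [x]).filter (fun y => key y == v)) := by
      intro V
      refine List.flatMap_congr (fun v _ => ?_)
      rw [List.filter_append]
      by_cases hv : v = key x
      · rw [if_pos hv, List.filter_cons, List.filter_nil]
        simp [hv]
      · rw [if_neg hv, List.filter_cons, List.filter_nil]
        have : (key x == v) = false := by simp; exact fun h => hv h.symm
        simp [this]
    by_cases hmem : key x ∈ xs.map key
    · have hmem' : key x ∈ distinctVals key xs := by
        rw [distinctVals, PySem.List.mem_sorted, PySem.Set.mem_ofList]
        exact hmem
      rw [insert_flatMap_mem key x _ _ (pairwise_distinctVals key xs) hg hmem', hgrpeq]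
      have hvals : distinctVals key (xs ++ [x]) = distinctVals key xs := by
        rw [distinctVals, List.map_append, List.map_cons, List.map_nil, ofList_append_singleton]
        rw [if_pos (PySem.Set.mem_ofList _ _ |>.mpr hmem)]
        rfl
      rw [hvals]
    · have hmem' : key x ∉ distinctVals key xs := by
        rw [distinctVals, PySem.List.mem_sorted, PySem.Set.mem_ofList]
        exact hmem
      have hx : xs.filter (fun y => key y == key x) = [] := by
        rw [List.filter_eq_nil_iff]
        intro y hy h
        exact hmem (List.mem_map.mpr ⟨y, hy, beq_iff_eq.mp h⟩)
      rw [insert_flatMap_fresh key x _ _ (pairwise_distinctVals key xs) hg hmem' hx, hgrpeq]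
      have hvals : distinctVals key (xs ++ [x]) = insVal (key x) (distinctVals key xs) := by
        rw [distinctVals, List.map_append, List.map_cons, List.map_nil, ofList_append_singleton]
        rw [if_neg (by rw [PySem.Set.mem_ofList]; exact hmem)]
        refine PySem.List.sorted_rev_eq_of_perm_of_pairwise_gt _ _ _ ?_ ?_
        · exact (perm_insVal _ _).trans
            (((PySem.List.sorted_perm _ _ _).cons (key x)).trans (List.perm_append_singleton _ _).symm)
        · exact pairwise_insVal _ _ (pairwise_distinctVals key xs)
            (fun w hw h => hmem' (h ▸ hw))
      rw [hvals]
theorem items_mk (l : List (String × Int)) : (PySem.Dict.mk l).items = l := rfl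

-- ===== VERDICT (by name: the statement is the Claim_ definition above) =====
theorem sort_dictionary_by_value_spec : Claim_equal_sort_dictionary_by_value := by
  intro l _hdom hpre
  unfold Spec_sort_dictionary_by_value
  have hpre' : (l.map (fun p => p.1)).Nodup := hpre
  -- the common value: the stable descending sort of the items by value
  set S : List (String × Int) := PySem.List.sorted l (fun p => p.2) true with hSdef
  have hSperm : S.Perm l := PySem.List.sorted_perm l (fun p => p.2) true
  have hSnodup : (S.map (fun p => p.1)).Nodup := by
    exact ((hSperm.map (fun p => p.1)).symm.nodup) hpre'
  have hitems : ∀ (L : List (String × Int)), (L.map (fun p => p.1)).Nodup →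
      (L.foldl (fun r p => r.insert p.1 p.2) (PySem.Dict.empty : PySem.Dict String Int)).items = L := by
    intro L hnd
    rw [PySem.Dict.items_foldl_insert_fresh L (fun p => p.1) (fun p => p.2) PySem.Dict.empty
      (fun a _ => PySem.Dict.contains_empty _) hnd]
    simp [PySem.Dict.empty]
  -- A side
  have hlist : l.foldl (fun acc item => acc ++ [(item.1, (PySem.Dict.mk l).getD item.1 0)]) [] = l := by
    rw [PySem.List.foldl_append_singleton_eq_map (fun item => (item.1, (PySem.Dict.mk l).getD item.1 0)) l []]
    rw [List.nil_append]
    have : ∀ p ∈ l, (p.1, (PySem.Dict.mk l).getD p.1 0) = p := by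
      intro p hp
      have hmem : (p.1, p.2) ∈ (PySem.Dict.mk l).items := by rw [items_mk]; simpa using hp
      have := PySem.Dict.getD_of_mem_items (PySem.Dict.mk l) hmem hpre' 0
      simp [this]
    rw [List.map_congr_left this]
    exact List.map_id' l
  have hA : sort_dictionary_by_value l = S := by
    show ((PySem.List.sorted (l.foldl (fun acc item => acc ++ [(item.1, (PySem.Dict.mk l).getD item.1 0)]) []) (fun p => p.2) true).foldl (fun r p => r.insert p.1 p.2) (PySem.Dict.empty : PySem.Dict String Int)).items = S
    rw [hlist, ← hSdef]
    exact hitems S hSnodup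
  -- B side
  set buckets : PySem.Dict Int (List String) :=
    l.foldl (fun b p => b.modify p.2 [] (fun ks => ks ++ [p.1])) PySem.Dict.empty with hbdef
  have hkeys : buckets.keys = PySem.Set.ofList (l.map (fun p => p.2)) := by
    have h := PySem.Dict.keys_foldl_modify_key l (fun p => p.2) ([] : List String)
      (fun _ p ks => ks ++ [p.1]) PySem.Dict.empty
    rw [PySem.Dict.keys_empty] at h
    exact h
  have hbucket : ∀ v : Int, buckets.getD v [] = (l.filter (fun p => p.2 == v)).map (fun p => p.1) := by
    intro v
    have h1 : buckets = (l.map (fun p => (p.2, p.1))).foldl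
        (fun d q => d.modify q.1 [] (fun ks => ks ++ [q.2])) PySem.Dict.empty := by
      rw [hbdef, List.foldl_map]
    rw [h1, PySem.Dict.getD_foldl_modify_append]
    simp [List.filter_map, List.map_map, Function.comp_def]
  set vals : List Int := PySem.List.sorted buckets.keys (fun v => v) true with hvdef
  have hvals : vals = distinctVals (fun p : String × Int => p.2) l := by
    rw [hvdef, hkeys]; rfl
  have hSflat : vals.flatMap (fun v => l.filter (fun p => p.2 == v)) = S := by
    rw [hvals, hSdef]
    exact (sorted_rev_eq_flatMap_groups (fun p : String × Int => p.2) l).symm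
  have hB : sort_dictionary_by_value_alt l = S := by
    show (vals.foldl (fun r v => (buckets.getD v []).foldl (fun r k => r.insert k v) r)
        (PySem.Dict.empty : PySem.Dict String Int)).items = S
    have hnest : vals.foldl (fun r v => (buckets.getD v []).foldl (fun r k => r.insert k v) r)
          (PySem.Dict.empty : PySem.Dict String Int)
        = (vals.flatMap (fun v => (buckets.getD v []).map (fun k => (k, v)))).foldl
            (fun r p => r.insert p.1 p.2) PySem.Dict.empty := by
      simp only [List.foldl_flatMap, List.foldl_map]
    have hL : vals.flatMap (fun v => (buckets.getD v []).map (fun k => (k, v)))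
        = vals.flatMap (fun v => l.filter (fun p => p.2 == v)) := by
      refine List.flatMap_congr (fun v _ => ?_)
      rw [hbucket v, List.map_map]
      have : ∀ p ∈ l.filter (fun p => p.2 == v), ((fun k => (k, v)) ∘ (fun p : String × Int => p.1)) p = p := by
        intro p hp
        have h2 := beq_iff_eq.mp (List.mem_filter.mp hp).2
        simp only [Function.comp_apply, ← h2]
      rw [List.map_congr_left this]
      exact List.map_id' _
    rw [hnest, hL, hSflat]
    exact hitems S hSnodup
  rw [hA, hB]
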